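-- pv_equiv track=rewrite | github.com/gavinjackson/bsides--ctf | comprehensive_solver.py | build_solution_string
-- ===== SOURCE A (Python) =====
-- QUOTE = "AAAA AA A ABBABB ABAC BCCAB A BCDCB CB CDEDC DCDDEIDDCEDEDHIDEDHEIEIKEEEIFKENMEHIMINIONIINNNRNONNNRORSRRRRRSRSTSSRSSSSSUWUSUST"
--
-- WIDTH = 9
--
-- def build_solution_string(grid):
--     """Build the complete solution string from grid"""
--     result = QUOTE[:35]  # Fixed header
--
--     # Add the 9x9 grid part
--     for row in range(14):  # 14 rows total
--         for col in range(WIDTH):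
--             if row < len(grid) and col < len(grid[row]) and grid[row][col] is not None:
--                 result += grid[row][col]
--             elif row * WIDTH + col + 35 < len(QUOTE):
--                 result += QUOTE[row * WIDTH + col + 35]
--             else:
--                 result += " "
--
--     return result
-- ===== SOURCE B (Python) =====
-- QUOTE = "AAAA AA A ABBABB ABAC BCCAB A BCDCB CB CDEDC DCDDEIDDCEDEDHIDEDHEIEIKEEEIFKENMEHIMINIONIINNNRNONNNRORSRRRRRSRSTSSRSSSSSUWUSUST"
--
-- WIDTH = 9
--
-- def build_solution_string(grid):
--     """Build the complete solution string from grid"""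
--     # All non-grid output (header + every fallback char) precomputed once:
--     base = list(QUOTE.ljust(35 + 14 * WIDTH))
--     # Override pass: only visits cells the grid actually has.
--     for row in range(min(14, len(grid))):
--         cells = grid[row]
--         for col in range(min(WIDTH, len(cells))):
--             if cells[col] is not None:
--                 base[35 + row * WIDTH + col] = cells[col]
--     return "".join(base)
-- ===== Notes on version B (the rewrite author's own statement) =====
-- stated objective: simpler
-- what changed: Instead of interleaving a three-way branch (grid cell / QUOTE char / space) at each of the 14x9 positions while concatenating, B precomputes the entire non-grid output once as list(QUOTE.ljust(161)) and then runs a separate override pass that only visits the cells the grid actually has (bounds min(14,len(grid)) and min(WIDTH,len(row))), overwriting positions 35+row*9+col before a single join.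
import Mathlib
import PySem

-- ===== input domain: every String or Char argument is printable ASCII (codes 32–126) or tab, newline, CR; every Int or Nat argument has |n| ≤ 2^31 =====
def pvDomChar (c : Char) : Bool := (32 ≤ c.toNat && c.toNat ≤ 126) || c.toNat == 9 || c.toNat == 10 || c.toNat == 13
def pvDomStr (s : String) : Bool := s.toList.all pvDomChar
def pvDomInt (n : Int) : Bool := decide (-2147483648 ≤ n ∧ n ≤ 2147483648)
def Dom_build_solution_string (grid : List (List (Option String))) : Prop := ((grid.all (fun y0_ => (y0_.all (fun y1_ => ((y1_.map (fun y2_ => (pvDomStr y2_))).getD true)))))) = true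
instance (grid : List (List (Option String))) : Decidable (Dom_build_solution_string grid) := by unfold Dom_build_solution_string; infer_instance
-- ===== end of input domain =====

set_option maxRecDepth 20000


-- B precomputes the whole non-grid output once (header + fallback, QUOTE left-padded to 161 chars)
-- and then only overwrites the positions the grid actually provides; objective: simpler (one
-- override pass over existing cells instead of a three-way branch at each of the 126 positions).

def pvQUOTE : String := "AAAA AA A ABBABB ABAC BCCAB A BCDCB CB CDEDC DCDDEIDDCEDEDHIDEDHEIEIKEEEIFKENMEHIMINIONIINNNRNONNNRORSRRRRRSRSTSSRSSSSSUWUSUST"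

def pvWIDTH : Int := 9

-- ===== PORT A =====
-- string concatenation is carried on List Char (PySem's representation); exact
def build_solution_string (grid : List (List (Option String))) : String :=
  let q : List Char := pvQUOTE.toList
  let result : List Char := PySem.List.slice q none (some 35)  -- QUOTE[:35]
  let result := (PySem.List.pyRange 0 14).foldl (fun result row =>
    (PySem.List.pyRange 0 pvWIDTH).foldl (fun result col =>
      if (row < (grid.length : Int) ∧ col < ((PySem.List.pyGetD grid row []).length : Int) ∧
          PySem.List.pyGetD (PySem.List.pyGetD grid row []) col none ≠ none) then
        result ++ ((PySem.List.pyGetD (PySem.List.pyGetD grid row []) col none).getD "").toList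
      else if row * pvWIDTH + col + 35 < (q.length : Int) then
        result ++ [PySem.List.pyGetD q (row * pvWIDTH + col + 35) ' ']
      else
        result ++ [' ']) result) result
  String.ofList result

-- ===== PORT B =====
-- QUOTE.ljust(35 + 14*9) is ported by hand (PySem has no ljust): pad on the right with spaces;
-- exact here since len(QUOTE) = 126 ≤ 161.  WIDTH = 9.
def build_solution_string_alt (grid : List (List (Option String))) : String :=
  let q : List Char := pvQUOTE.toList
  let base : List String := (q ++ List.replicate (35 + 14 * 9 - q.length) ' ').map (fun c => String.ofList [c])
  let base := (List.range (min 14 grid.length)).foldl (fun base row =>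
    let cells := grid.getD row []
    (List.range (min 9 cells.length)).foldl (fun base col =>
      match cells.getD col none with
      | some s => base.set (35 + row * 9 + col) s
      | none => base) base) base
  PySem.Str.join "" base

-- ===== PRECONDITION & SPEC =====
def Spec_build_solution_string (grid : List (List (Option String))) (out : String) : Prop := out = build_solution_string_alt grid
instance (grid : List (List (Option String))) (out : String) : Decidable (Spec_build_solution_string grid out) := by unfold Spec_build_solution_string; infer_instance

-- ===== CLAIM (what is proved, stated in full; the proofs are below) =====
def Claim_equal_build_solution_string : Prop := ∀ (grid : List (List (Option String))), Dom_build_solution_string grid → Spec_build_solution_string grid (build_solution_string grid)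

-- ===== LEMMAS AND PROOFS =====

-- QUOTE padded with spaces to the full output width 161
def pvPadded : List Char := pvQUOTE.toList ++ List.replicate 35 ' '

-- the fallback character at absolute output position i, as a 1-char string
def pvFb (i : Nat) : String := String.ofList [pvPadded.getD i ' ']

-- what both programs emit at body position (r, c)
def pvCell (grid : List (List (Option String))) (r c : Nat) : String :=
  if r < grid.length ∧ c < (grid.getD r []).length ∧ (grid.getD r []).getD c none ≠ none then
    ((grid.getD r []).getD c none).getD ""
  else pvFb (35 + r * 9 + c)

def pvTail (t : Nat) : List String := (pvPadded.drop t).map (fun c => String.ofList [c])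
def pvHeader : List String := (pvPadded.take 35).map (fun c => String.ofList [c])
def pvRowS (grid : List (List (Option String))) (r : Nat) : List String := (List.range 9).map (pvCell grid r)

-- the common normal form both ports are reduced to (as a flat char list)
def pvCharTarget (grid : List (List (Option String))) : List Char :=
  pvQUOTE.toList.take 35 ++
    (List.range 14).flatMap (fun r => (List.range 9).flatMap (fun c => (pvCell grid r c).toList))

lemma pv_join_nil_flatten (l : List (List Char)) : PySem.Chars.join [] l = l.flatten := by
  induction l with
  | nil => rfl
  | cons x xs ih =>
    cases xs with
    | nil => simp [PySem.Chars.join_singleton]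
    | cons y ys => simp [PySem.Chars.join_cons_cons, ih]

lemma pv_set_mid {α : Type} (P S : List α) (x v : α) :
    (P ++ x :: S).set P.length v = P ++ v :: S := by
  rw [List.set_append]; simp

lemma pv_padded_length : pvPadded.length = 161 := by decide

lemma pv_tail_161 : pvTail 161 = [] := by
  rw [pvTail, List.drop_eq_nil_of_le (by rw [pv_padded_length])]
  rfl

lemma pv_tail_cons (t : Nat) (h : t < 161) : pvTail t = pvFb t :: pvTail (t + 1) := by
  have hlen : t < pvPadded.length := by rw [pv_padded_length]; omega
  conv_lhs => rw [pvTail, List.drop_eq_getElem_cons hlen]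
  rw [List.map_cons, pvFb, List.getD_eq_getElem _ _ hlen]
  rfl

lemma pv_tail_split (k t : Nat) (h : t + k ≤ 161) :
    pvTail t = (List.range' t k).map pvFb ++ pvTail (t + k) := by
  induction k generalizing t with
  | zero => simp
  | succ k ih =>
    rw [List.range'_succ, List.map_cons, List.cons_append, pv_tail_cons t (by omega)]
    congr 1
    rw [show t + (k + 1) = (t + 1) + k from by omega]
    exact ih (t + 1) (by omega)

lemma pv_range'_shift (a b n : Nat) :
    List.range' (a + b) n = (List.range' b n).map (a + ·) := by
  induction n generalizing b with
  | zero => simp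
  | succ n ih =>
    rw [List.range'_succ, List.range'_succ, List.map_cons, ← ih (b + 1)]
    rw [Nat.add_assoc]

-- the inner column loop of B, over the columns the row actually has
lemma pv_range_split (n k : Nat) (h : k ≤ n) :
    List.range n = List.range k ++ List.range' k (n - k) := by
  have h2 : k + (n - k) = n := by omega
  have happ : List.range' 0 k 1 ++ List.range' (0 + 1 * k) (n - k) 1 = List.range' 0 (k + (n - k)) 1 :=
    List.range'_append
  simp only [Nat.zero_add, Nat.one_mul] at happ
  rw [h2] at happ
  rw [List.range_eq_range', ← happ, ← List.range_eq_range']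

lemma pv_inner (grid : List (List (Option String))) (r : Nat) (hr14 : r < 14)
    (hr : r < grid.length) :
    ∀ k, k ≤ min 9 (grid.getD r []).length → ∀ P : List String, P.length = 35 + r * 9 →
    (List.range k).foldl (fun base col =>
        match (grid.getD r []).getD col none with
        | some s => base.set (35 + r * 9 + col) s
        | none => base) (P ++ pvTail (35 + r * 9))
    = P ++ (List.range k).map (pvCell grid r) ++ pvTail (35 + r * 9 + k) := by
  intro k
  induction k with
  | zero => intro _ P hP; simp
  | succ k ih =>
    intro hk P hP
    have hk9 : k < 9 := by omega
    have hkm : k < (grid.getD r []).length := by omega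
    have hidx : 35 + r * 9 + k < 161 := by omega
    have hlen2 : (P ++ (List.range k).map (pvCell grid r)).length = 35 + r * 9 + k := by
      simp [hP]
    rw [List.range_succ, List.foldl_append, ih (by omega) P hP]
    rw [pv_tail_cons _ hidx]
    simp only [List.foldl_cons, List.foldl_nil]
    cases hcell : (grid.getD r []).getD k none with
    | none =>
      have hcv : pvCell grid r k = pvFb (35 + r * 9 + k) := by
        rw [pvCell, if_neg]
        rintro ⟨_, _, hne⟩
        exact hne hcell
      show P ++ (List.range k).map (pvCell grid r) ++
          pvFb (35 + r * 9 + k) :: pvTail (35 + r * 9 + k + 1) = _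
      rw [List.map_append]
      simp [hcv, Nat.add_assoc]
    | some s =>
      have hcv : pvCell grid r k = s := by
        rw [pvCell, if_pos ⟨hr, hkm, by rw [hcell]; simp⟩, hcell]
        rfl
      have hset := pv_set_mid (P ++ (List.range k).map (pvCell grid r))
        (pvTail (35 + r * 9 + k + 1)) (pvFb (35 + r * 9 + k)) s
      rw [hlen2] at hset
      show (P ++ (List.range k).map (pvCell grid r) ++
          pvFb (35 + r * 9 + k) :: pvTail (35 + r * 9 + k + 1)).set (35 + r * 9 + k) s = _
      rw [hset, List.map_append]
      simp [hcv, Nat.add_assoc]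

-- columns (and whole rows) the grid does not provide keep the precomputed fallback
lemma pv_fill (grid : List (List (Option String))) (r : Nat) (hr14 : r < 14) (k : Nat)
    (hk : k ≤ 9) (hfb : ∀ c, k ≤ c → c < 9 → pvCell grid r c = pvFb (35 + r * 9 + c)) :
    pvTail (35 + r * 9 + k) = (List.range' k (9 - k)).map (pvCell grid r) ++ pvTail (35 + r * 9 + 9) := by
  rw [pv_tail_split (9 - k) (35 + r * 9 + k) (by omega)]
  have harith : 35 + r * 9 + k + (9 - k) = 35 + r * 9 + 9 := by omega
  rw [harith]
  congr 1
  rw [show 35 + r * 9 + k = (35 + r * 9) + k from rfl, pv_range'_shift, List.map_map]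
  apply List.map_congr_left
  intro c hc
  have hc2 := List.mem_range'_1.mp hc
  exact (hfb c hc2.1 (by omega)).symm

-- one full row of B's override loop, whether or not the grid has that row
lemma pv_row (grid : List (List (Option String))) (r : Nat) (hr14 : r < 14) :
    ∀ P : List String, P.length = 35 + r * 9 →
    (List.range (min 9 (grid.getD r []).length)).foldl (fun base col =>
        match (grid.getD r []).getD col none with
        | some s => base.set (35 + r * 9 + col) s
        | none => base) (P ++ pvTail (35 + r * 9))
    = P ++ pvRowS grid r ++ pvTail (35 + (r + 1) * 9) := by
  intro P hP
  have h9 : 35 + (r + 1) * 9 = 35 + r * 9 + 9 := by ring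
  by_cases hr : r < grid.length
  · set k := min 9 (grid.getD r []).length with hkdef
    have hk9 : k ≤ 9 := by omega
    rw [pv_inner grid r hr14 hr k le_rfl P hP]
    have hfb : ∀ c, k ≤ c → c < 9 → pvCell grid r c = pvFb (35 + r * 9 + c) := by
      intro c hc1 hc2
      have hnc : ¬ c < (grid.getD r []).length := by omega
      rw [pvCell, if_neg]
      rintro ⟨_, hcl, _⟩
      exact hnc hcl
    rw [pv_fill grid r hr14 k hk9 hfb, h9]
    have hsplit : pvRowS grid r =
        (List.range k).map (pvCell grid r) ++ (List.range' k (9 - k)).map (pvCell grid r) := by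
      rw [pvRowS, pv_range_split 9 k hk9, List.map_append]
    rw [hsplit]
    simp
  · have hempty : (grid.getD r []).length = 0 := by
      rw [List.getD_eq_default]
      · rfl
      · omega
    rw [hempty]
    simp only [Nat.min_zero, List.range_zero, List.foldl_nil]
    have hfb : ∀ c, 0 ≤ c → c < 9 → pvCell grid r c = pvFb (35 + r * 9 + c) := by
      intro c _ _
      rw [pvCell, if_neg]
      rintro ⟨hrl, _, _⟩
      exact hr hrl
    have hfill := pv_fill grid r hr14 0 (by omega) hfb
    rw [Nat.add_zero] at hfill
    rw [hfill, h9, pvRowS, List.range_eq_range', Nat.sub_zero, List.append_assoc]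

lemma pv_header_length : pvHeader.length = 35 := by
  rw [pvHeader, List.length_map, List.length_take, pv_padded_length]
  decide

-- the outer row loop of B over the rows the grid actually has
lemma pv_outer (grid : List (List (Option String))) :
    ∀ R, R ≤ 14 → R ≤ grid.length →
    (List.range R).foldl (fun base row =>
      (List.range (min 9 (grid.getD row []).length)).foldl (fun base col =>
          match (grid.getD row []).getD col none with
          | some s => base.set (35 + row * 9 + col) s
          | none => base) base) (pvHeader ++ pvTail 35)
    = pvHeader ++ (List.range R).flatMap (pvRowS grid) ++ pvTail (35 + R * 9) := by
  intro R
  induction R with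
  | zero => intro _ _; simp
  | succ R ih =>
    intro h14 hg
    rw [List.range_succ, List.foldl_append, ih (by omega) (by omega)]
    simp only [List.foldl_cons, List.foldl_nil]
    have hlen : (pvHeader ++ (List.range R).flatMap (pvRowS grid)).length = 35 + R * 9 := by
      rw [List.length_append, pv_header_length, List.length_flatMap]
      have : ∀ r ∈ List.range R, (pvRowS grid r).length = 9 := by
        intro r _; simp [pvRowS]
      rw [List.map_congr_left this]
      simp [List.map_const', List.sum_replicate, smul_eq_mul]
    rw [pv_row grid R (by omega) _ hlen, List.flatMap_append]
    simp

-- rows past the grid keep the precomputed fallback text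
lemma pv_rows_tail (grid : List (List (Option String))) :
    ∀ j R, R + j = 14 → grid.length ≤ R →
    pvTail (35 + R * 9) = (List.range' R j).flatMap (pvRowS grid) := by
  intro j
  induction j with
  | zero =>
    intro R hR _
    have : R = 14 := by omega
    subst this
    simpa using pv_tail_161
  | succ j ih =>
    intro R hR hg
    have hfb : ∀ c, 0 ≤ c → c < 9 → pvCell grid R c = pvFb (35 + R * 9 + c) := by
      intro c _ _
      rw [pvCell, if_neg]
      rintro ⟨hrl, _, _⟩
      omega
    have hfill := pv_fill grid R (by omega) 0 (by omega) hfb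
    rw [Nat.add_zero] at hfill
    rw [hfill, show 35 + R * 9 + 9 = 35 + (R + 1) * 9 from by ring, ih (R + 1) (by omega) (by omega)]
    conv_rhs => rw [List.range'_succ]
    simp [List.flatMap_cons, pvRowS, List.range_eq_range']

lemma pv_base0 :
    (pvQUOTE.toList ++ List.replicate (35 + 14 * 9 - pvQUOTE.toList.length) ' ').map
        (fun c => String.ofList [c]) = pvHeader ++ pvTail 35 := by
  rw [pvHeader, pvTail, ← List.map_append, List.take_append_drop]
  rw [show 35 + 14 * 9 - pvQUOTE.toList.length = 35 from by decide]
  rfl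

lemma pv_flatten_map_flatMap {α β γ : Type} (l : List α) (g : α → List β) (f : β → List γ) :
    ((l.flatMap g).map f).flatten = l.flatMap (fun x => ((g x).map f).flatten) := by
  induction l with
  | nil => rfl
  | cons x xs ih => simp [List.flatMap_cons, ih]

-- joining the common normal form gives pvCharTarget
lemma pv_join_target (grid : List (List (Option String))) :
    (PySem.Str.join "" (pvHeader ++ (List.range 14).flatMap (pvRowS grid))).toList
      = pvCharTarget grid := by
  rw [PySem.Str.toList_join, show ("" : String).toList = [] from rfl, pv_join_nil_flatten]
  rw [List.map_append, List.flatten_append, pvCharTarget]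
  have hh : (List.map String.toList pvHeader).flatten = pvQUOTE.toList.take 35 := by
    rw [pvHeader, List.map_map]
    have h1 : (String.toList ∘ fun c => String.ofList [c]) = fun c => [c] := by
      funext c; simp
    rw [h1, pvPadded, List.take_append_of_le_length (by decide), ← pv_join_nil_flatten,
      PySem.Chars.join_nil_singletons]
  have hb : (List.map String.toList ((List.range 14).flatMap (pvRowS grid))).flatten
      = (List.range 14).flatMap (fun r => (List.range 9).flatMap (fun c => (pvCell grid r c).toList)) := by
    rw [pv_flatten_map_flatMap]
    congr 1
  rw [hh, hb]

-- B's port equals the normal form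
lemma pv_B_toList (grid : List (List (Option String))) :
    (build_solution_string_alt grid).toList = pvCharTarget grid := by
  rw [build_solution_string_alt]
  simp only []
  rw [pv_base0]
  rw [pv_outer grid (min 14 grid.length) (by omega) (by omega)]
  by_cases hg : grid.length < 14
  · have hmin : min 14 grid.length = grid.length := by omega
    rw [hmin]
    rw [pv_rows_tail grid (14 - grid.length) grid.length (by omega) le_rfl]
    rw [List.append_assoc, ← List.flatMap_append,
      ← pv_range_split 14 grid.length (by omega)]
    exact pv_join_target grid
  · have hmin : min 14 grid.length = 14 := by omega
    rw [hmin, show (35 + 14 * 9 : Nat) = 161 from rfl, pv_tail_161, List.append_nil]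
    exact pv_join_target grid

-- the fallback character of pvPadded, split by the length of QUOTE
lemma pv_padded_getD (n : Nat) :
    pvPadded.getD n ' ' = if n < 126 then pvQUOTE.toList.getD n ' ' else ' ' := by
  have hq : pvQUOTE.toList.length = 126 := by decide
  by_cases h : n < 126
  · rw [if_pos h, pvPadded, List.getD_append _ _ _ _ (by omega)]
  · rw [if_neg h, pvPadded, List.getD_append_right _ _ _ _ (by omega)]
    by_cases h2 : n - pvQUOTE.toList.length < 35
    · rw [List.getD_eq_getElem _ _ (by simpa using h2), List.getElem_replicate]
    · rw [List.getD_eq_default _ _ (by simpa using h2)]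

-- A's per-position step term equals pvCell
lemma pv_stepA (grid : List (List (Option String))) (r c : Nat) (res : List Char) :
    (if ((r : Int) < (grid.length : Int) ∧ (c : Int) < ((PySem.List.pyGetD grid (r : Int) []).length : Int) ∧
          PySem.List.pyGetD (PySem.List.pyGetD grid (r : Int) []) (c : Int) none ≠ none) then
        res ++ ((PySem.List.pyGetD (PySem.List.pyGetD grid (r : Int) []) (c : Int) none).getD "").toList
      else if (r : Int) * pvWIDTH + (c : Int) + 35 < (pvQUOTE.toList.length : Int) then
        res ++ [PySem.List.pyGetD pvQUOTE.toList ((r : Int) * pvWIDTH + (c : Int) + 35) ' ']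
      else
        res ++ [' '])
    = res ++ (pvCell grid r c).toList := by
  have hq : pvQUOTE.toList.length = 126 := by decide
  simp only [PySem.List.pyGetD_natCast, Nat.cast_lt]
  rw [pvCell]
  by_cases h1 : r < grid.length ∧ c < (grid.getD r []).length ∧ (grid.getD r []).getD c none ≠ none
  · rw [if_pos h1, if_pos h1]
  · rw [if_neg h1, if_neg h1]
    have hidx : (r : Int) * pvWIDTH + (c : Int) + 35 = ((r * 9 + c + 35 : Nat) : Int) := by
      rw [pvWIDTH]; push_cast; ring
    rw [hidx, hq]
    have hfb : (pvFb (35 + r * 9 + c)).toList = [pvPadded.getD (35 + r * 9 + c) ' '] := by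
      rw [pvFb]; simp
    by_cases h2 : r * 9 + c + 35 < 126
    · rw [if_pos (by exact_mod_cast h2), PySem.List.pyGetD_natCast, hfb, pv_padded_getD,
        if_pos (by omega), show 35 + r * 9 + c = r * 9 + c + 35 from by omega]
    · rw [if_neg (by exact_mod_cast h2), hfb, pv_padded_getD, if_neg (by omega)]

-- A's port equals the normal form
lemma pv_A_toList (grid : List (List (Option String))) :
    (build_solution_string grid).toList = pvCharTarget grid := by
  rw [build_solution_string]
  have h14 : PySem.List.pyRange 0 14 = List.map (fun (k : Nat) => (k : Int)) (List.range 14) := by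
    rw [show (14 : Int) = ((14 : Nat) : Int) from rfl, PySem.List.pyRange_zero_natCast]
  have h9 : PySem.List.pyRange 0 pvWIDTH = List.map (fun (k : Nat) => (k : Int)) (List.range 9) := by
    rw [pvWIDTH, show (9 : Int) = ((9 : Nat) : Int) from rfl, PySem.List.pyRange_zero_natCast]
  rw [h14, List.foldl_map]
  rw [PySem.List.foldl_congr_mem _ _
      (fun res r => res ++ (List.range 9).flatMap (fun c => (pvCell grid r c).toList)) _
      (by
        intro res r _
        rw [h9, List.foldl_map]
        rw [PySem.List.foldl_congr_mem _ _
            (fun res c => res ++ (pvCell grid r c).toList) _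
            (by
              intro res' c _
              exact pv_stepA grid r c res')]
        rw [PySem.List.foldl_append_eq_flatMap])]
  rw [PySem.List.foldl_append_eq_flatMap]
  rw [PySem.List.slice_to _ (by norm_num)]
  rw [pvCharTarget]
  simp

-- ===== VERDICT (by name: the statement is the Claim_ definition above) =====
theorem build_solution_string_spec : Claim_equal_build_solution_string := by
  intro grid _
  unfold Spec_build_solution_string
  have h := (pv_A_toList grid).trans (pv_B_toList grid).symm
  exact String.toList_inj.mp h
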